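-- pv_equiv track=rewrite | github.com/haiyu001/ds-healthcare | annotation/components/extractor.py | _get_noun_phrases_ids
-- ===== SOURCE A (Python) =====
-- from typing import List, Optional, Tuple
--
-- def _get_noun_phrases_ids(pos_list: List[str], noun_phrase_max_words_count: int = 4) -> List[Tuple[int, int]]:
--     res = []
--     noun_propn_ids = [i for i, pos in enumerate(pos_list) if pos == "NOUN" or pos == "PROPN"]
--     size = len(noun_propn_ids)
--     if size >= 2:
--         start = end = noun_propn_ids[0]
--         i = 1
--         while i <= size:
--             if i != size and noun_propn_ids[i] == noun_propn_ids[i - 1] + 1: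
--                 end = noun_propn_ids[i]
--             else:
--                 if 2 <= end - start + 1 <= noun_phrase_max_words_count:
--                     res.append((start, end + 1))
--                 start = end = noun_propn_ids[i] if i < size else -1
--             i += 1
--     return res
-- ===== SOURCE B (Python) =====
-- from typing import List, Tuple
--
-- def _get_noun_phrases_ids(pos_list: List[str], noun_phrase_max_words_count: int = 4) -> List[Tuple[int, int]]:
--     res = []
--     run_start = None
--     for i, pos in enumerate(pos_list):
--         if pos == "NOUN" or pos == "PROPN":
--             if run_start is None:
--                 run_start = i
--         elif run_start is not None:
--             if 2 <= i - run_start <= noun_phrase_max_words_count: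
--                 res.append((run_start, i))
--             run_start = None
--     if run_start is not None:
--         n = len(pos_list)
--         if 2 <= n - run_start <= noun_phrase_max_words_count:
--             res.append((run_start, n))
--     return res
-- ===== Notes on version B (the rewrite author's own statement) =====
-- stated objective: simpler
-- what changed: Single pass over pos_list tracking an open run start, instead of prebuilding the list of noun indices and running a separate index-scanning while loop over it.
import Mathlib
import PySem

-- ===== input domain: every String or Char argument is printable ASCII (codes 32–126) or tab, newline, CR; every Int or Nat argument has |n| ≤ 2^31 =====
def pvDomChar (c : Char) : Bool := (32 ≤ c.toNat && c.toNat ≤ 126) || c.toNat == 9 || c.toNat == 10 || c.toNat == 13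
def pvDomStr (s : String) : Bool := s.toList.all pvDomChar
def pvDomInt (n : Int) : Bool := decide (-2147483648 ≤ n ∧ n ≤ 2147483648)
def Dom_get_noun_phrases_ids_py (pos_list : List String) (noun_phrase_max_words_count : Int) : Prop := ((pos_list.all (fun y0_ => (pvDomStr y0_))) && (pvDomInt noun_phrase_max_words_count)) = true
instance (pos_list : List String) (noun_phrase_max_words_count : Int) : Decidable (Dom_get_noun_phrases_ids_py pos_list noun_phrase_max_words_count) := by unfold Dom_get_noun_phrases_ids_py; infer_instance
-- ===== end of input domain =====

-- B replaces A's prebuilt noun-index list + index-scanning while loop by one pass over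
-- pos_list tracking an open run start (objective: simpler).

-- ===== PORT A =====
-- pos == "NOUN" or pos == "PROPN"
def pvIsN (p : String) : Bool := p == "NOUN" || p == "PROPN"

-- A's while loop over noun_propn_ids, carrying res/start/end; `e` is the previous id
-- (Python's noun_propn_ids[i-1]), the remaining ids are the list argument.
def pvLoopA (mx : Int) (res : List (Int × Int)) (start e : Int) : List Int → List (Int × Int)
  | [] => if 2 ≤ e - start + 1 ∧ e - start + 1 ≤ mx then res ++ [(start, e + 1)] else res
  | x :: xs =>
      if x = e + 1 then pvLoopA mx res start x xs
      else pvLoopA mx (if 2 ≤ e - start + 1 ∧ e - start + 1 ≤ mx then res ++ [(start, e + 1)] else res) x x xs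

def get_noun_phrases_ids_py (pos_list : List String) (noun_phrase_max_words_count : Int) : List (Int × Int) :=
  let noun_propn_ids : List Int :=
    (PySem.List.enumerate pos_list).foldl (fun acc ip => if pvIsN ip.2 then acc ++ [ip.1] else acc) []
  if 2 ≤ noun_propn_ids.length then
    match noun_propn_ids with
    | x :: xs => pvLoopA noun_phrase_max_words_count [] x x xs
    | [] => []
  else []

-- ===== PORT B =====
-- B's single pass: index i, optional open-run start; the [] case is the trailing close
-- (there i equals len(pos_list)).
def pvLoopB (mx : Int) (res : List (Int × Int)) (runStart : Option Int) (i : Int) : List String → List (Int × Int)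
  | [] =>
      match runStart with
      | some s => if 2 ≤ i - s ∧ i - s ≤ mx then res ++ [(s, i)] else res
      | none => res
  | p :: ps =>
      if pvIsN p then
        pvLoopB mx res (match runStart with | none => some i | some s => some s) (i + 1) ps
      else
        match runStart with
        | some s => pvLoopB mx (if 2 ≤ i - s ∧ i - s ≤ mx then res ++ [(s, i)] else res) none (i + 1) ps
        | none => pvLoopB mx res none (i + 1) ps

def get_noun_phrases_ids_py_alt (pos_list : List String) (noun_phrase_max_words_count : Int) : List (Int × Int) :=
  pvLoopB noun_phrase_max_words_count [] none 0 pos_list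

-- ===== PRECONDITION & SPEC =====
def Spec_get_noun_phrases_ids_py (pos_list : List String) (noun_phrase_max_words_count : Int) (out : List (Int × Int)) : Prop := out = get_noun_phrases_ids_py_alt pos_list noun_phrase_max_words_count
instance (pos_list : List String) (noun_phrase_max_words_count : Int) (out : List (Int × Int)) : Decidable (Spec_get_noun_phrases_ids_py pos_list noun_phrase_max_words_count out) := by unfold Spec_get_noun_phrases_ids_py; infer_instance

-- ===== CLAIM (what is proved, stated in full; the proofs are below) =====
def Claim_equal_get_noun_phrases_ids_py : Prop := ∀ (pos_list : List String) (noun_phrase_max_words_count : Int), Dom_get_noun_phrases_ids_py pos_list noun_phrase_max_words_count → Spec_get_noun_phrases_ids_py pos_list noun_phrase_max_words_count (get_noun_phrases_ids_py pos_list noun_phrase_max_words_count)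

-- ===== LEMMAS AND PROOFS =====

-- emit a closed run [s..e] (half-open output (s, e+1)) if its length fits
def pvEmit (mx s e : Int) : List (Int × Int) :=
  if 2 ≤ e - s + 1 ∧ e - s + 1 ≤ mx then [(s, e + 1)] else []

-- canonical run-grouping over the noun-id list, state = open run (start, last id)
def pvCanon (mx : Int) : List Int → Option (Int × Int) → List (Int × Int)
  | [], none => []
  | [], some (s, e) => pvEmit mx s e
  | x :: xs, none => pvCanon mx xs (some (x, x))
  | x :: xs, some (s, e) =>
      if x = e + 1 then pvCanon mx xs (some (s, x))
      else pvEmit mx s e ++ pvCanon mx xs (some (x, x))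

-- indices ≥ i (relative to the suffix `rest`) whose tag is NOUN/PROPN
def pvIds (i : Int) : List String → List Int
  | [] => []
  | p :: ps => if pvIsN p then i :: pvIds (i + 1) ps else pvIds (i + 1) ps

lemma pvIds_ge : ∀ (rest : List String) (j x : Int), x ∈ pvIds j rest → j ≤ x := by
  intro rest
  induction rest with
  | nil => intro j x h; simp [pvIds] at h
  | cons p ps ih =>
    intro j x h
    by_cases hp : pvIsN p
    · simp [pvIds, hp] at h
      rcases h with h | h
      · omega
      · have := ih (j + 1) x h; omega
    · simp [pvIds, hp] at h
      have := ih (j + 1) x h; omega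

lemma canon_break (mx s e : Int) (L : List Int) (h : ∀ x ∈ L, e + 1 < x) :
    pvCanon mx L (some (s, e)) = pvEmit mx s e ++ pvCanon mx L none := by
  cases L with
  | nil => simp [pvCanon]
  | cons x xs =>
    have hx := h x (List.mem_cons_self ..)
    simp only [pvCanon]
    rw [if_neg (by omega)]

lemma loopA_eq (mx : Int) : ∀ (rest : List Int) (res : List (Int × Int)) (s e : Int),
    pvLoopA mx res s e rest = res ++ pvCanon mx rest (some (s, e)) := by
  intro rest
  induction rest with
  | nil =>
    intro res s e
    simp only [pvLoopA, pvCanon, pvEmit]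
    split <;> simp
  | cons x xs ih =>
    intro res s e
    simp only [pvLoopA, pvCanon]
    by_cases h : x = e + 1
    · simp [h, ih]
    · rw [if_neg h, if_neg h, ih]
      simp only [pvEmit]
      split <;> simp

lemma loopB_eq (mx : Int) : ∀ (rest : List String) (res : List (Int × Int)) (st : Option Int) (i : Int),
    pvLoopB mx res st i rest = res ++ pvCanon mx (pvIds i rest) (st.map fun s => (s, i - 1)) := by
  intro rest
  induction rest with
  | nil =>
    intro res st i
    cases st with
    | none => simp [pvLoopB, pvIds, pvCanon]
    | some s =>
      simp only [pvLoopB, pvIds, pvCanon, Option.map, pvEmit,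
        show i - 1 - s + 1 = i - s from by ring, show i - 1 + 1 = i from by ring]
      split <;> simp
  | cons p ps ih =>
    intro res st i
    by_cases hp : pvIsN p
    · cases st with
      | none =>
        simp only [pvLoopB, if_pos hp, pvIds, ih, Option.map]
        simp only [pvCanon, show i + 1 - 1 = i from by ring]
      | some s =>
        simp only [pvLoopB, if_pos hp, pvIds, ih, Option.map]
        simp only [pvCanon, show i + 1 - 1 = i from by ring]
        rw [if_pos (show i = i - 1 + 1 from by ring)]
    · cases st with
      | none =>
        simp only [pvLoopB, if_neg hp, pvIds, ih, Option.map]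
      | some s =>
        simp only [pvLoopB, if_neg hp, pvIds, ih, Option.map]
        rw [canon_break mx s (i - 1) (pvIds (i + 1) ps)
          (by intro x hx; have := pvIds_ge ps (i + 1) x hx; omega)]
        simp only [pvEmit, show i - 1 - s + 1 = i - s from by ring,
          show i - 1 + 1 = i from by ring]
        split <;> simp

lemma ids_foldl : ∀ (rest : List String) (s : Int) (acc : List Int),
    (PySem.List.enumerate rest s).foldl (fun acc ip => if pvIsN ip.2 then acc ++ [ip.1] else acc) acc
      = acc ++ pvIds s rest := by
  intro rest
  induction rest with
  | nil => intro s acc; simp [PySem.List.enumerate_nil, pvIds]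
  | cons p ps ih =>
    intro s acc
    rw [PySem.List.enumerate_cons]
    simp only [List.foldl_cons]
    by_cases hp : pvIsN p
    · simp [hp, ih, pvIds]
    · simp [hp, ih, pvIds]

lemma A_eq_canon (pos_list : List String) (mx : Int) :
    get_noun_phrases_ids_py pos_list mx = pvCanon mx (pvIds 0 pos_list) none := by
  unfold get_noun_phrases_ids_py
  rw [ids_foldl pos_list 0 []]
  simp only [List.nil_append]
  cases h : pvIds 0 pos_list with
  | nil => simp [pvCanon]
  | cons x xs =>
    cases xs with
    | nil =>
      rw [if_neg (by simp)]
      simp only [pvCanon, pvEmit]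
      rw [if_neg (by omega)]
    | cons y ys =>
      rw [if_pos (by simp)]
      show pvLoopA mx [] x x (y :: ys) = pvCanon mx (x :: y :: ys) none
      rw [loopA_eq]
      simp [pvCanon]

lemma B_eq_canon (pos_list : List String) (mx : Int) :
    get_noun_phrases_ids_py_alt pos_list mx = pvCanon mx (pvIds 0 pos_list) none := by
  unfold get_noun_phrases_ids_py_alt
  rw [loopB_eq]
  simp

-- ===== VERDICT (by name: the statement is the Claim_ definition above) =====
theorem get_noun_phrases_ids_py_spec : Claim_equal_get_noun_phrases_ids_py := by
  intro pos_list mx _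
  unfold Spec_get_noun_phrases_ids_py
  rw [A_eq_canon, B_eq_canon]
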